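-- pv_equiv track=rewrite | github.com/clement-bonnefond/L3-MPCI-internship | codeV2.py | combiner_lignes
-- ===== SOURCE A (Python) =====
-- def combiner_lignes(liste, nbre_listes_a_combiner = 1):
--
--     '''
--     :param liste: liste avec toutes les séquences
--     :param nbre_ligne_a_combiner: définis le nombre de lignes à combiner
--     :return: new_l : liste qui combine les sous-listes.
--
--             Ex : nbre_ligne_a_combiner = 2 pour liste l = [[1, 2], [4], [5, 6], [7]]
--                  new_l = [[1, 2, 4], [4, 5, 6], [5, 6, 7]]
--
--             Ex : nbre_ligne_a_combiner = 3 pour liste l = [[1, 2], [4], [5, 6], [7]]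
--                  new_l = [[1, 2, 4, 5, 6], [4, 5, 6, 7]]
--     '''
--
--     new = [[]] * (len(liste) - (nbre_listes_a_combiner - 1))
--     for i in range(len(liste) - (nbre_listes_a_combiner - 1)):
--         count = 0
--
--         while count != nbre_listes_a_combiner:
--             new[i] = new[i] + liste[i + count]
--             count = count + 1
--
--     return new
-- ===== SOURCE B (Python) =====
-- def combiner_lignes(liste, nbre_listes_a_combiner=1):
--     # Flatten everything once and record prefix offsets; each window row is then
--     # a single slice of the flat list -- no per-window concatenation of sublists.
--     flat = []
--     offsets = [0]
--     for sous_liste in liste: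
--         flat.extend(sous_liste)
--         offsets.append(len(flat))
--     k = nbre_listes_a_combiner
--     return [flat[offsets[i]:offsets[i + k]] for i in range(len(liste) - k + 1)]
-- ===== Notes on version B (the rewrite author's own statement) =====
-- stated objective: alternative
-- what changed: B flattens the whole list once while recording prefix-sum offsets, then produces each window row as a single slice flat[offsets[i]:offsets[i+k]] of the flattened list, eliminating per-window concatenation of sublists (it trades A's repeated concatenation for one flattening pass plus slicing); Pre_ excludes nbre_listes_a_combiner < 0, where A's while loop never terminates.
import Mathlib
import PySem

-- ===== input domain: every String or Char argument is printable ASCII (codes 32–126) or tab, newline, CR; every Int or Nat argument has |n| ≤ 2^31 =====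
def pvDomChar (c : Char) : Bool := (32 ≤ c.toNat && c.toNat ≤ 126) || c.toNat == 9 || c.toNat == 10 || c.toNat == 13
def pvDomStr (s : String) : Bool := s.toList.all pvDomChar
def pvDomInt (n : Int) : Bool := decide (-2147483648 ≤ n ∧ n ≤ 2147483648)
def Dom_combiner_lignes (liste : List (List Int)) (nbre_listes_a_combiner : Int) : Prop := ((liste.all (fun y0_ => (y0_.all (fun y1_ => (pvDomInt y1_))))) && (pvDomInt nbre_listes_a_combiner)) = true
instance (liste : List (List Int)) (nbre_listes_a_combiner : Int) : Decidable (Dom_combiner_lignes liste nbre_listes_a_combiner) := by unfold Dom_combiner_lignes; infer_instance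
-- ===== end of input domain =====

-- Alternative: B flattens the input once while recording prefix-sum offsets and emits each
-- window row as a single slice of the flat list, instead of A's repeated per-window concatenation.


-- ===== PORT A =====
-- the pre-allocated list of shared empties: each slot is only rebound (never mutated in place),
-- so a replicate is exact.
-- 'while count != nbre_listes_a_combiner' runs count = 0,1,…,k-1 when 0 ≤ k (for k < 0 the Python
-- loop never terminates; Pre_ excludes that), hence it is rendered as a fold over pyRange 0 k 1;
-- the indexed access is in range whenever the outer range is nonempty, so pyGetD with a default is exact.
def combiner_lignes (liste : List (List Int)) (nbre_listes_a_combiner : Int) : List (List Int) :=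
  let n : Int := (liste.length : Int) - (nbre_listes_a_combiner - 1)
  let new : List (List Int) := List.replicate n.toNat []
  (PySem.List.pyRange 0 n 1).foldl
    (fun new i =>
      (PySem.List.pyRange 0 nbre_listes_a_combiner 1).foldl
        (fun new count =>
          new.set i.toNat ((new.getD i.toNat []) ++ PySem.List.pyGetD liste (i + count) []))
        new)
    new

-- ===== PORT B =====
-- one pass builds (flat, offsets) — the flattened list and the prefix-sum offsets; each window
-- row is then a single slice flat[offsets[i]:offsets[i+k]].  Inside Pre_ every offsets index
-- used is in range (0 ≤ i ≤ i+k ≤ len liste), so pyGetD with default 0 is exact for offsets[·].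
def combiner_lignes_alt (liste : List (List Int)) (nbre_listes_a_combiner : Int) : List (List Int) :=
  let st : List Int × List Int :=
    liste.foldl
      (fun (st : List Int × List Int) sous_liste =>
        (st.1 ++ sous_liste, st.2 ++ [((st.1 ++ sous_liste).length : Int)]))
      ([], [0])
  (PySem.List.pyRange 0 ((liste.length : Int) - nbre_listes_a_combiner + 1) 1).map
    (fun i =>
      PySem.List.slice st.1
        (some (PySem.List.pyGetD st.2 i 0))
        (some (PySem.List.pyGetD st.2 (i + nbre_listes_a_combiner) 0)))

-- ===== PRECONDITION & SPEC =====
-- Pre_ excludes nbre_listes_a_combiner < 0, on which A's 'while count != k' never terminates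
-- (A returns on every input with 0 ≤ k; nothing A returns on is excluded).
def Pre_combiner_lignes (liste : List (List Int)) (nbre_listes_a_combiner : Int) : Prop :=
  0 ≤ nbre_listes_a_combiner
instance (liste : List (List Int)) (nbre_listes_a_combiner : Int) : Decidable (Pre_combiner_lignes liste nbre_listes_a_combiner) := by unfold Pre_combiner_lignes; infer_instance
def pvWitness_combiner_lignes : List (List Int) × Int := ([[1, 2], [4], [5, 6], [7]], 2)

def Spec_combiner_lignes (liste : List (List Int)) (nbre_listes_a_combiner : Int) (out : List (List Int)) : Prop := out = combiner_lignes_alt liste nbre_listes_a_combiner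
instance (liste : List (List Int)) (nbre_listes_a_combiner : Int) (out : List (List Int)) : Decidable (Spec_combiner_lignes liste nbre_listes_a_combiner out) := by unfold Spec_combiner_lignes; infer_instance

-- ===== CLAIM (what is proved, stated in full; the proofs are below) =====
def Claim_equal_combiner_lignes : Prop := ∀ (liste : List (List Int)) (nbre_listes_a_combiner : Int), Dom_combiner_lignes liste nbre_listes_a_combiner → Pre_combiner_lignes liste nbre_listes_a_combiner → Spec_combiner_lignes liste nbre_listes_a_combiner (combiner_lignes liste nbre_listes_a_combiner)

-- ===== LEMMAS AND PROOFS =====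

-- A's inner while loop: repeatedly appending liste[i+count] at slot i sets slot i to its old
-- value ++ the flatMap of the window, and leaves every other slot alone.
theorem pv_inner_eq (liste : List (List Int)) (i : Int) :
    ∀ (m : Nat) (a b : Int), (b - a).toNat = m → ∀ (new : List (List Int)), i.toNat < new.length →
    (PySem.List.pyRange a b 1).foldl
      (fun new count =>
        new.set i.toNat ((new.getD i.toNat []) ++ PySem.List.pyGetD liste (i + count) [])) new
    = new.set i.toNat ((new.getD i.toNat []) ++
        (PySem.List.pyRange a b 1).flatMap (fun c => PySem.List.pyGetD liste (i + c) [])) := by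
  intro m
  induction m with
  | zero =>
    intro a b hm new h
    rw [PySem.List.pyRange_one_eq_nil (by omega)]
    simp [List.getD_eq_getElem?_getD, List.getElem?_eq_getElem h]
  | succ m ih =>
    intro a b hm new h
    have hab : a < b := by omega
    rw [PySem.List.pyRange_one_cons hab]
    rw [List.foldl_cons]
    rw [ih (a+1) b (by omega) _ (by simpa using h)]
    simp [List.getD_eq_getElem?_getD, List.getElem?_set_self', List.getElem?_eq_getElem h,
      List.set_set, List.append_assoc]

-- A's outer for loop: starting from slots a.toNat.. all [], it fills slot i with window i,
-- producing take a ++ the mapped windows.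
theorem pv_outer_eq (liste : List (List Int)) (k : Int) (n : Int) :
    ∀ (m : Nat) (a : Int), 0 ≤ a → (n - a).toNat = m →
    ∀ (new : List (List Int)), new.length = n.toNat →
    (∀ j (hj : j < new.length), a.toNat ≤ j → new[j] = []) →
    (PySem.List.pyRange a n 1).foldl
      (fun new i => (PySem.List.pyRange 0 k 1).foldl
        (fun new count => new.set i.toNat ((new.getD i.toNat []) ++ PySem.List.pyGetD liste (i + count) [])) new) new
    = new.take a.toNat ++ (PySem.List.pyRange a n 1).map
        (fun i => (PySem.List.pyRange 0 k 1).flatMap (fun c => PySem.List.pyGetD liste (i + c) [])) := by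
  intro m
  induction m with
  | zero =>
    intro a ha hm new hlen hz
    have hna : n ≤ a := by omega
    rw [PySem.List.pyRange_one_eq_nil hna]
    simp only [List.foldl_nil, List.map_nil, List.append_nil]
    rw [List.take_of_length_le (by omega)]
  | succ m ih =>
    intro a ha hm new hlen hz
    have han : a < n := by omega
    have hlt : a.toNat < new.length := by omega
    rw [PySem.List.pyRange_one_cons han, List.foldl_cons]
    rw [pv_inner_eq liste a (m := (k - 0).toNat) 0 k rfl new hlt]
    rw [List.getD_eq_getElem?_getD, List.getElem?_eq_getElem hlt]
    rw [hz a.toNat hlt le_rfl]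
    simp only [Option.getD_some, List.nil_append]
    rw [ih (a+1) (by omega) (by omega) _ (by simpa using hlen)
        (by
          intro j hj hge
          simp only [List.length_set] at hj
          rw [List.getElem_set_ne (by omega)]
          exact hz j hj (by omega))]
    rw [List.map_cons]
    have htake : (new.set a.toNat ((PySem.List.pyRange 0 k 1).flatMap
          (fun c => PySem.List.pyGetD liste (a + c) []))).take (a+1).toNat
        = new.take a.toNat ++ [(PySem.List.pyRange 0 k 1).flatMap
          (fun c => PySem.List.pyGetD liste (a + c) [])] := by
      apply List.ext_getElem
      · simp; omega
      · intro j h1 h2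
        have h1' : j < a.toNat + 1 := by simp at h1; omega
        by_cases hja : j = a.toNat
        · subst hja
          simp [List.getElem_append, List.getElem_set]
        · rw [List.getElem_take, List.getElem_set_ne (by omega)]
          rw [List.getElem_append_left (by simp; omega)]
          simp
    rw [htake, List.append_assoc, List.singleton_append]

-- the indexed window equals flatten of take-after-drop
theorem pv_window_eq (xs : List (List Int)) :
    ∀ (K j : Nat), j + K ≤ xs.length →
    (List.range K).flatMap (fun (c : Nat) => PySem.List.pyGetD xs ((j : Int) + (c : Int)) []) =
      ((xs.drop j).take K).flatten := by
  intro K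
  induction K with
  | zero => simp
  | succ K ih =>
    intro j h
    rw [List.range_succ, List.flatMap_append, ih j (by omega)]
    have hidx : j + K < xs.length := by omega
    have hget : PySem.List.pyGetD xs ((j : Int) + (K : Int)) [] = xs[j + K] := by
      rw [show ((j : Int) + (K : Int)) = ((j + K : Nat) : Int) by push_cast; ring,
        PySem.List.pyGetD_natCast, List.getD_eq_getElem?_getD, List.getElem?_eq_getElem hidx]
      rfl
    have htake : (xs.drop j).take (K + 1) = (xs.drop j).take K ++ [xs[j + K]] := by
      rw [List.take_add_one]
      congr 1
      rw [List.getElem?_drop, List.getElem?_eq_getElem hidx]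
      rfl
    rw [htake]
    simp [hget]

-- B's single pass: first component is acc ++ flatten
theorem pv_st_flat (xs : List (List Int)) : ∀ (acc : List Int) (offs : List Int),
    (xs.foldl
      (fun (st : List Int × List Int) sl => (st.1 ++ sl, st.2 ++ [((st.1 ++ sl).length : Int)]))
      (acc, offs)).1 = acc ++ xs.flatten := by
  induction xs with
  | nil => intro acc offs; simp
  | cons x xs ih =>
    intro acc offs
    simp only [List.foldl_cons]
    rw [ih]
    simp [List.append_assoc]

-- B's single pass: second component is offs ++ the prefix lengths
theorem pv_st_offs (xs : List (List Int)) : ∀ (acc : List Int) (offs : List Int),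
    (xs.foldl
      (fun (st : List Int × List Int) sl => (st.1 ++ sl, st.2 ++ [((st.1 ++ sl).length : Int)]))
      (acc, offs)).2
    = offs ++ (List.range xs.length).map
        (fun j => ((acc ++ (xs.take (j+1)).flatten).length : Int)) := by
  induction xs with
  | nil => intro acc offs; simp
  | cons x xs ih =>
    intro acc offs
    simp only [List.foldl_cons]
    rw [ih]
    simp only [List.length_cons, List.range_succ_eq_map, List.map_cons, List.map_map]
    simp [List.append_assoc, Function.comp]

-- the full offsets list is the prefix-length table over range (n+1)
theorem pv_offs_table (xs : List (List Int)) :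
    (xs.foldl
      (fun (st : List Int × List Int) sl => (st.1 ++ sl, st.2 ++ [((st.1 ++ sl).length : Int)]))
      ([], [0])).2
    = (List.range (xs.length + 1)).map (fun j => (((xs.take j).flatten).length : Int)) := by
  rw [pv_st_offs]
  rw [List.range_succ_eq_map, List.map_cons, List.map_map]
  simp [Function.comp]

-- reading an offset inside range
theorem pv_offs_get (xs : List (List Int)) (j : Nat) (h : j ≤ xs.length) :
    PySem.List.pyGetD
      ((List.range (xs.length + 1)).map (fun j => (((xs.take j).flatten).length : Int)))
      ((j : Nat) : Int) 0
    = (((xs.take j).flatten).length : Int) := by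
  rw [PySem.List.pyGetD_natCast, List.getD_eq_getElem?_getD, List.getElem?_map,
    List.getElem?_range (by omega)]
  rfl

-- a slice of the flat list between prefix offsets is exactly the window's flatten
theorem pv_slice_window (xs : List (List Int)) (m K : Nat) (h : m + K ≤ xs.length) :
    PySem.List.slice xs.flatten
      (some ((((xs.take m).flatten).length : Nat) : Int))
      (some ((((xs.take (m + K)).flatten).length : Nat) : Int))
    = ((xs.drop m).take K).flatten := by
  rw [PySem.List.slice_natCast]
  have hsplit : xs.flatten = (xs.take m).flatten ++ (xs.drop m).flatten := by
    rw [← List.flatten_append, List.take_append_drop]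
  have hdrop : xs.flatten.drop ((xs.take m).flatten.length) = (xs.drop m).flatten := by
    rw [hsplit, List.drop_left]
  have htake_add : xs.take (m + K) = xs.take m ++ (xs.drop m).take K := by
    rw [List.take_add]
  have hlen : (xs.take (m + K)).flatten.length
      = (xs.take m).flatten.length + ((xs.drop m).take K).flatten.length := by
    rw [htake_add, List.flatten_append, List.length_append]
  rw [hdrop, hlen]
  have hsplit2 : (xs.drop m).flatten = ((xs.drop m).take K).flatten ++ ((xs.drop m).drop K).flatten := by
    rw [← List.flatten_append, List.take_append_drop]
  rw [show (xs.take m).flatten.length + ((xs.drop m).take K).flatten.length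
        - (xs.take m).flatten.length = ((xs.drop m).take K).flatten.length by omega,
    hsplit2, List.take_left]

-- ===== VERDICT (by name: the statement is the Claim_ definition above) =====
theorem combiner_lignes_spec : Claim_equal_combiner_lignes := by
  intro liste k _ hkP
  have hk : (0 : Int) ≤ k := hkP
  unfold Spec_combiner_lignes combiner_lignes combiner_lignes_alt
  rw [pv_outer_eq liste k ((liste.length : Int) - (k - 1))
      (((liste.length : Int) - (k - 1)) - 0).toNat 0 le_rfl rfl
      (List.replicate ((liste.length : Int) - (k - 1)).toNat []) (by simp)
      (by intro j hj _; simp)]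
  simp only [Int.toNat_zero, List.take_zero, List.nil_append]
  rw [show (liste.length : Int) - (k - 1) = (liste.length : Int) - k + 1 by ring]
  simp only [pv_st_flat, pv_offs_table, List.nil_append]
  apply List.map_congr_left
  intro i hi
  rw [PySem.List.mem_pyRange_one] at hi
  obtain ⟨h0i, hin⟩ := hi
  have hbound : i.toNat + k.toNat ≤ liste.length := by omega
  rw [show i = ((i.toNat : Nat) : Int) by omega] at *
  rw [Int.toNat_natCast] at *
  -- B's row: slice between prefix offsets = flatten of the window
  rw [show ((i.toNat : Nat) : Int) + k = (((i.toNat + k.toNat : Nat) : Nat) : Int) by push_cast; omega]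
  rw [pv_offs_get liste i.toNat (by omega), pv_offs_get liste (i.toNat + k.toNat) (by omega)]
  rw [show (((liste.take i.toNat).flatten.length : Int)) = (((liste.take i.toNat).flatten.length : Nat) : Int) by rfl]
  rw [show (((liste.take (i.toNat + k.toNat)).flatten.length : Int)) = (((liste.take (i.toNat + k.toNat)).flatten.length : Nat) : Int) by rfl]
  rw [pv_slice_window liste i.toNat k.toNat hbound]
  -- A's row: the while-loop accumulation = flatten of the same window
  rw [PySem.List.pyRange_one, show ((k : Int) - 0).toNat = k.toNat by omega]
  rw [List.flatMap_map]
  rw [← pv_window_eq liste k.toNat i.toNat hbound]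
  apply List.flatMap_congr
  intro c _
  norm_num
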